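-- pv_equiv track=rewrite | github.com/bobmatnyc/the-island | scripts/analysis/categorize_entities.py | determine_document_appearance
-- ===== SOURCE A (Python) =====
-- from typing import Dict, List, Any, Set
--
-- def determine_document_appearance(sources: List[str]) -> str:
--     """Determine which document type(s) entity appears in"""
--     source_set = set(s.lower() for s in sources)
--
--     has_flight = any('flight' in s for s in source_set)
--     has_black_book = any('black' in s or 'birthday' in s or 'book' in s for s in source_set)
--     has_court = any('court' in s or 'unsealed' in s or 'deposition' in s for s in source_set)
--
--     source_count = sum([has_flight, has_black_book, has_court])
--
--     if source_count >= 2: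
--         return 'multiple_sources'
--     elif has_flight:
--         return 'flight_logs_only'
--     elif has_black_book:
--         return 'black_book_only'
--     elif has_court:
--         return 'court_docs_only'
--     else:
--         return 'unknown'
-- ===== SOURCE B (Python) =====
-- KEYWORD_CATEGORIES = [
--     ('flight', 'flight'),
--     ('black', 'black_book'),
--     ('birthday', 'black_book'),
--     ('book', 'black_book'),
--     ('court', 'court'),
--     ('unsealed', 'court'),
--     ('deposition', 'court'),
-- ]
--
-- CLASSIFICATION = {
--     (False, False, False): 'unknown',
--     (True, False, False): 'flight_logs_only',
--     (False, True, False): 'black_book_only',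
--     (False, False, True): 'court_docs_only',
--     (True, True, False): 'multiple_sources',
--     (True, False, True): 'multiple_sources',
--     (False, True, True): 'multiple_sources',
--     (True, True, True): 'multiple_sources',
-- }
--
--
-- def determine_document_appearance(sources):
--     """Determine which document type(s) entity appears in"""
--     cats = set()
--     for src in sources:
--         s = src.lower()
--         for kw, cat in KEYWORD_CATEGORIES:
--             if kw in s:
--                 cats.add(cat)
--     return CLASSIFICATION[('flight' in cats, 'black_book' in cats, 'court' in cats)]
-- ===== Notes on version B (the rewrite author's own statement) =====
-- stated objective: alternative
-- what changed: Replaces the three hardcoded any() scans and the count/if-elif decision chain with a data-driven design: a keyword-to-category table drives one collection loop into a set of category names, and the final answer is a single lookup in an 8-entry truth-table dictionary.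
import Mathlib
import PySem

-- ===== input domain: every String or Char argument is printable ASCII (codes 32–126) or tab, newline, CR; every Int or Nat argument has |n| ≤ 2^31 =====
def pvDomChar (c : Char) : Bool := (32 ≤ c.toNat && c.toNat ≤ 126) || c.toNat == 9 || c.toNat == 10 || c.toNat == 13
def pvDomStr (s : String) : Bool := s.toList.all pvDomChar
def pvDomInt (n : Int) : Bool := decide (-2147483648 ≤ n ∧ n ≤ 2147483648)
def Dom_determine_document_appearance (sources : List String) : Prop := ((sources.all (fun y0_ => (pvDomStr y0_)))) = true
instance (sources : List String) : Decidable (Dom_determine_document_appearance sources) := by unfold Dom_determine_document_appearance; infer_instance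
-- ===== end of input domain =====

-- B is data-driven: a keyword-to-category table fills a set of category names in one
-- collection loop, and the result is a single lookup in an 8-entry truth-table dict
-- (alternative decomposition, same cost; no flag variables, no if/elif chain).

-- ===== PORT A =====
def determine_document_appearance (sources : List String) : String :=
  let source_set : PySem.Set String := PySem.Set.ofList (sources.map (fun s => PySem.Str.lower s))
  let has_flight := source_set.any (fun s => PySem.Str.isIn "flight" s)
  let has_black_book := source_set.any (fun s =>
    PySem.Str.isIn "black" s || PySem.Str.isIn "birthday" s || PySem.Str.isIn "book" s)
  let has_court := source_set.any (fun s =>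
    PySem.Str.isIn "court" s || PySem.Str.isIn "unsealed" s || PySem.Str.isIn "deposition" s)
  let source_count : Int :=
    (if has_flight then 1 else 0) + (if has_black_book then 1 else 0) + (if has_court then 1 else 0)
  if source_count ≥ 2 then "multiple_sources"
  else if has_flight then "flight_logs_only"
  else if has_black_book then "black_book_only"
  else if has_court then "court_docs_only"
  else "unknown"

-- ===== PORT B =====
def pvKeywordCategories : List (String × String) :=
  [("flight", "flight"), ("black", "black_book"), ("birthday", "black_book"),
   ("book", "black_book"), ("court", "court"), ("unsealed", "court"), ("deposition", "court")]

def pvClassification : PySem.Dict (Bool × Bool × Bool) String :=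
  PySem.Dict.ofList
    [((false, false, false), "unknown"),
     ((true, false, false), "flight_logs_only"),
     ((false, true, false), "black_book_only"),
     ((false, false, true), "court_docs_only"),
     ((true, true, false), "multiple_sources"),
     ((true, false, true), "multiple_sources"),
     ((false, true, true), "multiple_sources"),
     ((true, true, true), "multiple_sources")]

def determine_document_appearance_alt (sources : List String) : String :=
  let cats : PySem.Set String := sources.foldl (fun cats src =>
    let s := PySem.Str.lower src
    pvKeywordCategories.foldl
      (fun cats kc => if PySem.Str.isIn kc.1 s then PySem.Set.add cats kc.2 else cats) cats)
    PySem.Set.empty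
  -- Python's CLASSIFICATION[...] never misses: all 8 boolean triples are keys, so getD is exact
  PySem.Dict.getD pvClassification
    (PySem.Set.contains cats "flight", PySem.Set.contains cats "black_book",
     PySem.Set.contains cats "court") ""

-- ===== PRECONDITION & SPEC =====
def Spec_determine_document_appearance (sources : List String) (out : String) : Prop := out = determine_document_appearance_alt sources
instance (sources : List String) (out : String) : Decidable (Spec_determine_document_appearance sources out) := by unfold Spec_determine_document_appearance; infer_instance

-- ===== CLAIM (what is proved, stated in full; the proofs are below) =====
def Claim_equal_determine_document_appearance : Prop := ∀ (sources : List String), Dom_determine_document_appearance sources → Spec_determine_document_appearance sources (determine_document_appearance sources)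

-- ===== LEMMAS AND PROOFS =====

-- any over the Python set of a list equals any over the list (dedup does not change ∃).
theorem pv_any_ofList (l : List String) (p : String → Bool) :
    (PySem.Set.ofList l).any p = l.any p := by
  rw [Bool.eq_iff_iff, List.any_eq_true, List.any_eq_true]
  constructor <;> rintro ⟨x, hx, hp⟩ <;>
    exact ⟨x, by rw [PySem.Set.mem_ofList] at *; exact hx, hp⟩

-- One pass of B's inner keyword loop, observed at each of the three category names.
theorem pv_step_flight (cats : PySem.Set String) (s : String) :
    PySem.Set.contains (pvKeywordCategories.foldl
      (fun cats kc => if PySem.Str.isIn kc.1 s then PySem.Set.add cats kc.2 else cats) cats)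
      "flight"
    = (PySem.Set.contains cats "flight" || PySem.Str.isIn "flight" s) := by
  simp only [pvKeywordCategories, List.foldl_cons, List.foldl_nil]
  split_ifs <;> simp_all

theorem pv_step_bb (cats : PySem.Set String) (s : String) :
    PySem.Set.contains (pvKeywordCategories.foldl
      (fun cats kc => if PySem.Str.isIn kc.1 s then PySem.Set.add cats kc.2 else cats) cats)
      "black_book"
    = (PySem.Set.contains cats "black_book" ||
       (PySem.Str.isIn "black" s || PySem.Str.isIn "birthday" s || PySem.Str.isIn "book" s)) := by
  simp only [pvKeywordCategories, List.foldl_cons, List.foldl_nil]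
  split_ifs <;> simp_all

theorem pv_step_court (cats : PySem.Set String) (s : String) :
    PySem.Set.contains (pvKeywordCategories.foldl
      (fun cats kc => if PySem.Str.isIn kc.1 s then PySem.Set.add cats kc.2 else cats) cats)
      "court"
    = (PySem.Set.contains cats "court" ||
       (PySem.Str.isIn "court" s || PySem.Str.isIn "unsealed" s || PySem.Str.isIn "deposition" s)) := by
  simp only [pvKeywordCategories, List.foldl_cons, List.foldl_nil]
  split_ifs <;> simp_all

-- B's outer loop, observed at each category name, equals the corresponding any-scan.
theorem pv_fold_flight (sources : List String) (init : PySem.Set String) :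
    PySem.Set.contains (sources.foldl (fun cats src =>
      pvKeywordCategories.foldl
        (fun cats kc => if PySem.Str.isIn kc.1 (PySem.Str.lower src) then PySem.Set.add cats kc.2 else cats) cats)
      init) "flight"
    = (PySem.Set.contains init "flight" ||
       sources.any (fun src => PySem.Str.isIn "flight" (PySem.Str.lower src))) := by
  induction sources generalizing init with
  | nil => simp
  | cons h t ih =>
    rw [List.foldl_cons, ih, pv_step_flight]
    simp [Bool.or_assoc]

theorem pv_fold_bb (sources : List String) (init : PySem.Set String) :
    PySem.Set.contains (sources.foldl (fun cats src =>
      pvKeywordCategories.foldl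
        (fun cats kc => if PySem.Str.isIn kc.1 (PySem.Str.lower src) then PySem.Set.add cats kc.2 else cats) cats)
      init) "black_book"
    = (PySem.Set.contains init "black_book" ||
       sources.any (fun src => PySem.Str.isIn "black" (PySem.Str.lower src) ||
         PySem.Str.isIn "birthday" (PySem.Str.lower src) || PySem.Str.isIn "book" (PySem.Str.lower src))) := by
  induction sources generalizing init with
  | nil => simp
  | cons h t ih =>
    rw [List.foldl_cons, ih, pv_step_bb]
    simp [Bool.or_assoc]

theorem pv_fold_court (sources : List String) (init : PySem.Set String) :
    PySem.Set.contains (sources.foldl (fun cats src =>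
      pvKeywordCategories.foldl
        (fun cats kc => if PySem.Str.isIn kc.1 (PySem.Str.lower src) then PySem.Set.add cats kc.2 else cats) cats)
      init) "court"
    = (PySem.Set.contains init "court" ||
       sources.any (fun src => PySem.Str.isIn "court" (PySem.Str.lower src) ||
         PySem.Str.isIn "unsealed" (PySem.Str.lower src) || PySem.Str.isIn "deposition" (PySem.Str.lower src))) := by
  induction sources generalizing init with
  | nil => simp
  | cons h t ih =>
    rw [List.foldl_cons, ih, pv_step_court]
    simp [Bool.or_assoc]

-- ===== VERDICT (by name: the statement is the Claim_ definition above) =====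
theorem determine_document_appearance_spec : Claim_equal_determine_document_appearance := by
  intro sources _
  unfold Spec_determine_document_appearance
  unfold determine_document_appearance determine_document_appearance_alt
  simp only [pv_any_ofList, List.any_map, Function.comp_def,
    pv_fold_flight, pv_fold_bb, pv_fold_court]
  cases hf : sources.any (fun src => PySem.Str.isIn "flight" (PySem.Str.lower src)) <;>
  cases hb : sources.any (fun src => PySem.Str.isIn "black" (PySem.Str.lower src) ||
      PySem.Str.isIn "birthday" (PySem.Str.lower src) || PySem.Str.isIn "book" (PySem.Str.lower src)) <;>
  cases hc : sources.any (fun src => PySem.Str.isIn "court" (PySem.Str.lower src) ||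
      PySem.Str.isIn "unsealed" (PySem.Str.lower src) || PySem.Str.isIn "deposition" (PySem.Str.lower src)) <;>
  simp_all <;> rfl
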